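-- pv_equiv track=rewrite | github.com/CookIsGood/pdf-finder | buisness_logic/DocumentRecognizer.py | _find_min_area
-- ===== SOURCE A (Python) =====
-- def _find_min_area(blocks: list) -> tuple:
--     res, cords = [], []
--     for item in blocks:
--         for elem in item:
--             res.append(elem[0])
--             cords.append(elem[1])
--     index = res.index(min(res))
--     return cords, index
-- ===== SOURCE B (Python) =====
-- def _find_min_area(blocks: list) -> tuple:
--     cords = []
--     best = None
--     index = -1
--     counter = 0
--     for item in blocks:
--         for elem in item:
--             cords.append(elem[1])
--             if best is None or elem[0] < best:
--                 best = elem[0]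
--                 index = counter
--             counter += 1
--     if best is None:
--         raise ValueError("min() arg is an empty sequence")
--     return cords, index
-- ===== Notes on version B (the rewrite author's own statement) =====
-- stated objective: alternative
-- what changed: B fuses flattening, minimum computation and first-occurrence index search into one pass with a running (best, index, counter) accumulator, instead of building the res list and scanning it twice with min() and list.index().
import Mathlib
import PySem

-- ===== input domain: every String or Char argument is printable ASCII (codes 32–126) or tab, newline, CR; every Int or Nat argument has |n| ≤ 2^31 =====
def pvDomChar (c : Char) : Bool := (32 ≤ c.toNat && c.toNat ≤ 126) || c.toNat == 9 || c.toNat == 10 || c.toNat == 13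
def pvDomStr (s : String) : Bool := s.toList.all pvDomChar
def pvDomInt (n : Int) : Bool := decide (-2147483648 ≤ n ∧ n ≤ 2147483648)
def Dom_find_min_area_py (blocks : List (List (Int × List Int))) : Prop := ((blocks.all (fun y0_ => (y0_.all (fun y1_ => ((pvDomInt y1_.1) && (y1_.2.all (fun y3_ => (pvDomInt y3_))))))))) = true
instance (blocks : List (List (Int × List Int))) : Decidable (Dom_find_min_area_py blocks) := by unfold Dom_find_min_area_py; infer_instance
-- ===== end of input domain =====

-- B fuses flattening, minimum computation and first-occurrence index search into one
-- pass with a running (best, index, counter) accumulator, instead of building the res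
-- list and scanning it twice with min() and list.index()  (objective: alternative).


-- ===== PORT A =====
-- the inner-loop body: res.append(elem[0]); cords.append(elem[1])
def pvAStep (st : List Int × List (List Int)) (elem : Int × List Int) : List Int × List (List Int) :=
  (st.1 ++ [elem.1], st.2 ++ [elem.2])

def find_min_area_py (blocks : List (List (Int × List Int))) : List (List Int) × Int :=
  let st := blocks.foldl (fun st item => item.foldl pvAStep st) ([], [])
  let res := st.1
  let cords := st.2
  -- min(res) raises ValueError on empty res (excluded by Pre_); res.index(min(res)) then never fails
  let m := (PySem.List.min? res (fun x => x)).getD 0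
  let index := (PySem.List.index? res m).getD 0
  (cords, Int.ofNat index)

-- ===== PORT B =====
-- the inner-loop body of B: append elem[1]; update (best, index); counter += 1
def pvBStep (st : List (List Int) × Option Int × Int × Int) (elem : Int × List Int) :
    List (List Int) × Option Int × Int × Int :=
  match st with
  | (cords, best, index, counter) =>
    let cords' := cords ++ [elem.2]
    match best with
    | none => (cords', some elem.1, counter, counter + 1)
    | some b =>
      if elem.1 < b then (cords', some elem.1, counter, counter + 1)
      else (cords', some b, index, counter + 1)

def find_min_area_py_alt (blocks : List (List (Int × List Int))) : List (List Int) × Int :=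
  let st := blocks.foldl (fun st item => item.foldl pvBStep st) ([], none, -1, 0)
  -- best is None here only when the flattened input is empty: B raises ValueError there (excluded by Pre_)
  (st.1, st.2.2.1)

-- ===== PRECONDITION & SPEC =====
-- Pre_ excludes exactly the inputs with no elements at all: there A raises ValueError (min of
-- an empty list), and B raises the same ValueError.
def Pre_find_min_area_py (blocks : List (List (Int × List Int))) : Prop :=
  blocks.flatten ≠ []
instance (blocks : List (List (Int × List Int))) : Decidable (Pre_find_min_area_py blocks) := by unfold Pre_find_min_area_py; infer_instance

def pvWitness_find_min_area_py : (List (List (Int × List Int))) := [[(3, [1, 2]), (1, [5])], [(1, [7])]]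

def Spec_find_min_area_py (blocks : List (List (Int × List Int))) (out : List (List Int) × Int) : Prop := out = find_min_area_py_alt blocks
instance (blocks : List (List (Int × List Int))) (out : List (List Int) × Int) : Decidable (Spec_find_min_area_py blocks out) := by unfold Spec_find_min_area_py; infer_instance

-- ===== CLAIM (what is proved, stated in full; the proofs are below) =====
def Claim_equal_find_min_area_py : Prop := ∀ (blocks : List (List (Int × List Int))), Dom_find_min_area_py blocks → Pre_find_min_area_py blocks → Spec_find_min_area_py blocks (find_min_area_py blocks)

-- ===== LEMMAS AND PROOFS =====

-- A's nested accumulation just builds the two maps of the flattened list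
theorem afold_char (xs : List (Int × List Int)) (r : List Int) (c : List (List Int)) :
    xs.foldl pvAStep (r, c) = (r ++ xs.map Prod.fst, c ++ xs.map Prod.snd) := by
  induction xs generalizing r c with
  | nil => simp
  | cons e t ih => simp [pvAStep, ih]

theorem min?_id_eq (l : List Int) (b : Int) (hmem : b ∈ l) (hb : ∀ y ∈ l, b ≤ y) :
    PySem.List.min? l (fun x => x) = some b := by
  cases h : PySem.List.min? l (fun x => x) with
  | none =>
    rw [PySem.List.min?_eq_none_iff] at h
    simp [h] at hmem
  | some m =>
    have h1 := PySem.List.min?_isMin h b hmem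
    have h2 := hb m (PySem.List.min?_mem h)
    exact congrArg some (le_antisymm h1 h2)

-- B's single-pass loop invariant: starting after a non-empty prefix p whose running
-- minimum is b with first-occurrence index i0, the fold computes min?/index? of the whole list
theorem bfold_char (xs : List (Int × List Int)) (p : List (Int × List Int)) (b : Int) (i0 : Nat)
    (hb : ∀ y ∈ p.map Prod.fst, b ≤ y)
    (hi : PySem.List.index? (p.map Prod.fst) b = some i0) :
    xs.foldl pvBStep (p.map Prod.snd, some b, (i0 : Int), (p.length : Int)) =
      ((p ++ xs).map Prod.snd,
       PySem.List.min? ((p ++ xs).map Prod.fst) (fun x => x),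
       Int.ofNat ((PySem.List.index? ((p ++ xs).map Prod.fst)
         ((PySem.List.min? ((p ++ xs).map Prod.fst) (fun x => x)).getD 0)).getD 0),
       Int.ofNat (p ++ xs).length) := by
  induction xs generalizing p b i0 with
  | nil =>
    have hmem : b ∈ p.map Prod.fst := (PySem.List.index?_isSome_iff (p.map Prod.fst) b).mp (by rw [hi]; rfl)
    have hmin := min?_id_eq (p.map Prod.fst) b hmem hb
    simp only [PySem.List.index?_eq_idxOf?] at hi
    simp [List.foldl_nil, hmin, hi]
  | cons e t ih =>
    have hmem : b ∈ p.map Prod.fst := (PySem.List.index?_isSome_iff (p.map Prod.fst) b).mp (by rw [hi]; rfl)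
    by_cases hlt : e.1 < b
    · have hb' : ∀ y ∈ (p ++ [e]).map Prod.fst, e.1 ≤ y := by
        intro y hy
        rw [List.map_append] at hy
        rcases List.mem_append.mp hy with hy | hy
        · have := hb y hy
          omega
        · simp at hy
          omega
      have hnm : e.1 ∉ p.map Prod.fst := by
        intro h
        have := hb e.1 h
        omega
      have hi' : PySem.List.index? ((p ++ [e]).map Prod.fst) e.1 = some (p.map Prod.fst).length := by
        rw [List.map_append]
        exact PySem.List.index?_append_singleton_self _ _ hnm
      have := ih (p ++ [e]) e.1 (p.map Prod.fst).length hb' hi'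
      rw [List.foldl_cons]
      simp only [List.length_map] at this
      rw [show List.foldl pvBStep (pvBStep (p.map Prod.snd, some b, (i0 : Int), (p.length : Int)) e) t
            = List.foldl pvBStep ((p ++ [e]).map Prod.snd, some e.1, ((p.length : Nat) : Int), ((p ++ [e]).length : Int)) t by
            simp [pvBStep, hlt]]
      rw [this]
      simp [List.append_assoc]
    · have hb' : ∀ y ∈ (p ++ [e]).map Prod.fst, b ≤ y := by
        intro y hy
        simp only [List.map_append, List.mem_append, List.map_cons, List.map_nil, List.mem_singleton] at hy
        rcases hy with hy | hy
        · exact hb y hy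
        · omega
      have hi' : PySem.List.index? ((p ++ [e]).map Prod.fst) b = some i0 := by
        rw [List.map_append]
        rw [PySem.List.index?_append_of_mem _ hmem]
        exact hi
      have := ih (p ++ [e]) b i0 hb' hi'
      rw [List.foldl_cons]
      rw [show pvBStep (p.map Prod.snd, some b, (i0 : Int), (p.length : Int)) e
            = ((p ++ [e]).map Prod.snd, some b, (i0 : Int), ((p ++ [e]).length : Int)) by
            simp [pvBStep, hlt]]
      rw [this]
      simp [List.append_assoc]

-- ===== VERDICT (by name: the statement is the Claim_ definition above) =====
theorem find_min_area_py_spec : Claim_equal_find_min_area_py := by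
  intro blocks _ hpre
  unfold Spec_find_min_area_py
  simp only [find_min_area_py, find_min_area_py_alt]
  rw [← List.foldl_flatten (L := blocks) (f := pvAStep),
      ← List.foldl_flatten (L := blocks) (f := pvBStep)]
  unfold Pre_find_min_area_py at hpre
  obtain ⟨e, rest, hflat⟩ := List.exists_cons_of_ne_nil hpre
  rw [hflat]
  have hA := afold_char (e :: rest) [] []
  have hstart : List.foldl pvBStep ([], none, -1, 0) (e :: rest)
      = List.foldl pvBStep (([e] : List (Int × List Int)).map Prod.snd, some e.1,
          ((0 : Nat) : Int), (([e] : List (Int × List Int)).length : Int)) rest := by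
    simp [pvBStep]
  have hB := bfold_char rest [e] e.1 0 (by simp) (by simp)
  rw [hA, hstart, hB]
  simp
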